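-- pv_equiv track=rewrite | github.com/heitorchang/learn-code | battles/challenges/caucusRace.py | computeCycle
-- ===== SOURCE A (Python) =====
-- def computeCycle(values):
--     cycle = []
--     runningSum = 0
--     for n in values:
--         runningSum += n
--         cycle.append(runningSum)
--     for n in values:
--         runningSum += n
--         cycle.append(runningSum)
--     return cycle
-- ===== SOURCE B (Python) =====
-- from itertools import accumulate
--
-- def computeCycle(values):
--     first = list(accumulate(values))
--     if not first:
--         return []
--     total = first[-1]
--     return first + [p + total for p in first]
-- ===== Notes on version B (the rewrite author's own statement) =====
-- stated objective: alternative
-- what changed: B computes the prefix sums of values only once and derives the entire second half arithmetically by adding the grand total to each first-half prefix sum, instead of A's second accumulating pass over the values.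
import Mathlib
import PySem

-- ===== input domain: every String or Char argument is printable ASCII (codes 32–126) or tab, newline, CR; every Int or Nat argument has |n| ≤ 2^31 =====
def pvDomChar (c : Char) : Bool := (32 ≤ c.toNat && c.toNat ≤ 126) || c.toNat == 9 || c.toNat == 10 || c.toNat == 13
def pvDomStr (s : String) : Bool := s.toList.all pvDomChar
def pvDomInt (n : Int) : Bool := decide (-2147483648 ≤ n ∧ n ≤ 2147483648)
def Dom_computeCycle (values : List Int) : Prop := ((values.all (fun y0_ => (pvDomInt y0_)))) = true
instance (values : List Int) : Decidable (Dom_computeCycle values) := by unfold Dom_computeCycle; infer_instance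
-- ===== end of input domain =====

-- B computes the prefix sums once and derives the second half by adding the grand total to each first-half entry, instead of A's second accumulating pass (alternative decomposition; same cost).


-- ===== PORT A =====
-- Port of A: two sequential loops appending running sums, state (cycle, runningSum).
def computeCycle (values : List Int) : List Int :=
  let s1 := values.foldl (fun (p : List Int × Int) n => (p.1 ++ [p.2 + n], p.2 + n)) ([], 0)
  let s2 := values.foldl (fun (p : List Int × Int) n => (p.1 ++ [p.2 + n], p.2 + n)) s1
  s2.1

-- ===== PORT B =====
-- Port of B: accumulate once, then append the first half shifted by the total.
def pvAccum (acc : Int) : List Int → List Int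
  | [] => []
  | n :: rest => (acc + n) :: pvAccum (acc + n) rest

def computeCycle_alt (values : List Int) : List Int :=
  let first := pvAccum 0 values
  if first = [] then []
  else
    let total := first.getLast!
    first ++ first.map (fun p => p + total)

-- ===== PRECONDITION & SPEC =====
def Spec_computeCycle (values : List Int) (out : List Int) : Prop := out = computeCycle_alt values
instance (values : List Int) (out : List Int) : Decidable (Spec_computeCycle values out) := by unfold Spec_computeCycle; infer_instance

-- ===== CLAIM (what is proved, stated in full; the proofs are below) =====
def Claim_equal_computeCycle : Prop := ∀ (values : List Int), Dom_computeCycle values → Spec_computeCycle values (computeCycle values)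

-- ===== LEMMAS AND PROOFS =====

-- ===== VERDICT (by name: the statement is the Claim_ definition above) =====
theorem pvLoop_eq (xs : List Int) (c : List Int) (r : Int) :
    xs.foldl (fun (p : List Int × Int) n => (p.1 ++ [p.2 + n], p.2 + n)) (c, r)
      = (c ++ pvAccum r xs, r + xs.sum) := by
  induction xs generalizing c r with
  | nil => simp [pvAccum]
  | cons x xs ih => simp [pvAccum, ih, List.append_assoc]; ring

theorem pvAccum_shift (a t : Int) (xs : List Int) :
    pvAccum (a + t) xs = (pvAccum a xs).map (fun p => p + t) := by
  induction xs generalizing a with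
  | nil => simp [pvAccum]
  | cons x xs ih =>
    simp only [pvAccum, List.map_cons]
    rw [show a + t + x = a + x + t by ring, ih]

theorem pvAccum_getLast! (a : Int) (xs : List Int) (h : xs ≠ []) :
    (pvAccum a xs).getLast! = a + xs.sum := by
  induction xs generalizing a with
  | nil => exact absurd rfl h
  | cons x xs ih =>
    cases xs with
    | nil => simp [pvAccum]
    | cons y ys =>
      simp only [pvAccum, List.sum_cons]
      rw [show ((a + x) :: (a + x + y) :: pvAccum (a + x + y) ys).getLast!
            = (pvAccum (a + x) (y :: ys)).getLast! by
          simp [pvAccum, List.getLast!, List.getLast]]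
      rw [ih _ (by simp)]
      simp; ring

theorem computeCycle_spec : Claim_equal_computeCycle := by
  intro values _
  unfold Spec_computeCycle computeCycle computeCycle_alt
  simp only [pvLoop_eq]
  cases values with
  | nil => simp [pvAccum]
  | cons x xs =>
    have hne : pvAccum 0 (x :: xs) ≠ [] := by simp [pvAccum]
    simp only [if_neg hne, pvAccum_getLast! 0 (x :: xs) (by simp)]
    rw [show (0 : Int) + (x :: xs).sum = 0 + ((0:Int) + (x :: xs).sum) by ring,
        pvAccum_shift]
    simp
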